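-- pv_equiv track=rewrite | github.com/yermandy/weak-supervision | src/parse.py | parse_paths
-- ===== SOURCE A (Python) =====
-- def parse_paths(paths):
--     path_to_bag = {}
--     # index (int) -> bag (int)
--     index_to_bag = {}
--     # bag (int) -> indices (int array)
--     bag_to_index = {}
--
--     # Encode unique paths (str -> int)
--     bag_id = 0
--     for path in paths:
--         if path not in path_to_bag:
--             path_to_bag[path] = bag_id
--             bag_id += 1
--
--     for index, path in enumerate(paths):
--         bag = path_to_bag[path]
--         index_to_bag[index] = bag
--
--         if bag not in bag_to_index:
--             bag_to_index[bag] = [index]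
--         else:
--             bag_to_index[bag].append(index)
--
--     unique_paths = list(path_to_bag.keys())
--     return unique_paths, bag_to_index, index_to_bag
-- ===== SOURCE B (Python) =====
-- def parse_paths(paths):
--     # Declarative reformulation: dedup once, then express each output directly.
--     unique_paths = list(dict.fromkeys(paths))
--     bag_to_index = {bag: [i for i, q in enumerate(paths) if q == path]
--                     for bag, path in enumerate(unique_paths)}
--     index_to_bag = {i: unique_paths.index(path) for i, path in enumerate(paths)}
--     return unique_paths, bag_to_index, index_to_bag
-- ===== Notes on version B (the rewrite author's own statement) =====
-- stated objective: simpler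
-- what changed: Replaces A's stateful dict-building passes (assign bag ids while scanning, then a second scan that appends into bag_to_index) by a declarative form: dedup the paths once with dict.fromkeys, then write bag_to_index as a comprehension that collects the matching indices per unique path and index_to_bag as a comprehension over unique_paths.index.
import Mathlib
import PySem

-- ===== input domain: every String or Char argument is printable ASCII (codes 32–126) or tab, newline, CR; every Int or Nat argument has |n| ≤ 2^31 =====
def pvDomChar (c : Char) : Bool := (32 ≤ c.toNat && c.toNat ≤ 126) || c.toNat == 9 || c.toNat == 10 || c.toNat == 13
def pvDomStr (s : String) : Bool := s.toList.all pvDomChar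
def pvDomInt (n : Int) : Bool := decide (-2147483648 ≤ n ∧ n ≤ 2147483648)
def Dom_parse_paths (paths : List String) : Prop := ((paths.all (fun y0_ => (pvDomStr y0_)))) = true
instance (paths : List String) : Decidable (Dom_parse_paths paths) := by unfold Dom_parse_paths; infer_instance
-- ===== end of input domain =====

-- B replaces A's incremental dict-building passes by a declarative form (dedup the
-- paths once, then write each of the three outputs directly); simpler, same value.

-- ===== PORT A =====
-- first loop's body: if path not in path_to_bag: path_to_bag[path] = bag_id; bag_id += 1
def pvStepA (s : PySem.Dict String Int × Int) (path : String) : PySem.Dict String Int × Int :=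
  if s.1.contains path = false then (s.1.insert path s.2, s.2 + 1) else s

-- second loop (for index, path in enumerate(paths)), index carried explicitly
def pvLoopA2 (M : PySem.Dict String Int) :
    List String → Int → PySem.Dict Int (List Int) → PySem.Dict Int Int →
    PySem.Dict Int (List Int) × PySem.Dict Int Int
  | [], _, bti, itb => (bti, itb)
  | path :: rest, i, bti, itb =>
    let bag := (M.get? path).getD 0
    let itb := itb.insert i bag
    let bti := if bti.contains bag = false then bti.insert bag [i]
               else bti.modify bag [] (fun xs => xs ++ [i])
    pvLoopA2 M rest (i + 1) bti itb

def parse_paths (paths : List String) : List String × (List (Int × List Int)) × (List (Int × Int)) :=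
  let ptb := paths.foldl pvStepA (PySem.Dict.empty, 0)
  let M := ptb.1
  let r := pvLoopA2 M paths 0 PySem.Dict.empty PySem.Dict.empty
  (M.keys, r.1.items, r.2.items)

-- ===== PORT B =====
-- unique_paths = list(dict.fromkeys(paths)); bag_to_index is a dict comprehension over
-- enumerate(unique_paths) whose value is a list comprehension over enumerate(paths);
-- index_to_bag is a dict comprehension using unique_paths.index (the path is always
-- found, so the `.getD 0` after index? is never the default)
def parse_paths_alt (paths : List String) : List String × (List (Int × List Int)) × (List (Int × Int)) :=
  let up := PySem.List.dedup paths
  let bti := (PySem.List.enumerate up 0).foldl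
      (fun (d : PySem.Dict Int (List Int)) bp =>
        d.insert bp.1 ((PySem.List.enumerate paths 0).foldl
          (fun acc iq => if iq.2 == bp.2 then acc ++ [iq.1] else acc) []))
      PySem.Dict.empty
  let itb := (PySem.List.enumerate paths 0).foldl
      (fun (d : PySem.Dict Int Int) ip =>
        d.insert ip.1 ((((PySem.List.index? up ip.2).getD 0 : Nat) : Int)))
      PySem.Dict.empty
  (up, bti.items, itb.items)

-- ===== PRECONDITION & SPEC =====
def Spec_parse_paths (paths : List String) (out : List String × (List (Int × List Int)) × (List (Int × Int))) : Prop := out = parse_paths_alt paths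
instance (paths : List String) (out : List String × (List (Int × List Int)) × (List (Int × Int))) : Decidable (Spec_parse_paths paths out) := by unfold Spec_parse_paths; infer_instance

-- ===== CLAIM (what is proved, stated in full; the proofs are below) =====
def Claim_equal_parse_paths : Prop := ∀ (paths : List String), Dom_parse_paths paths → Spec_parse_paths paths (parse_paths paths)

-- ===== LEMMAS AND PROOFS =====

-- A's first loop keeps exactly the first occurrences as keys
theorem pvA1_keys (l : List String) (d : PySem.Dict String Int) (n : Int) :
    (l.foldl pvStepA (d, n)).1.keys = PySem.Set.update d.keys l := by
  induction l generalizing d n with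
  | nil => simp [PySem.Set.update]
  | cons p rest ih =>
    simp only [List.foldl_cons, PySem.Set.update, pvStepA]
    by_cases h : d.contains p = false
    · simp only [h, reduceIte]
      rw [ih]
      simp only [PySem.Set.update, PySem.Set.add, PySem.Set.contains]
      have hk : d.keys.contains p = false := by
        rw [PySem.Dict.contains_eq_decide_mem_keys] at h
        simpa using h
      rw [PySem.Dict.keys_insert_of_not_contains _ _ h]
      simp at hk
      simp [hk]
    · simp only [Bool.not_eq_false] at h
      simp only [h, Bool.true_eq_false, reduceIte]
      rw [ih]
      simp only [PySem.Set.update, PySem.Set.add, PySem.Set.contains]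
      have hk : d.keys.contains p = true := by
        rw [PySem.Dict.contains_eq_decide_mem_keys] at h
        simpa using h
      simp at hk
      simp [hk]

theorem pvA1_invariant (l : List String) (d : PySem.Dict String Int)
    (hn : d.keys.Nodup)
    (hv : ∀ q, d.get? q = (PySem.List.index? d.keys q).map (fun k => (k : Int))) :
    (l.foldl pvStepA (d, (d.keys.length : Int))).1.keys.Nodup ∧
    (∀ q, (l.foldl pvStepA (d, (d.keys.length : Int))).1.get? q
        = (PySem.List.index? (l.foldl pvStepA (d, (d.keys.length : Int))).1.keys q).map (fun k => (k : Int))) := by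
  induction l generalizing d with
  | nil => exact ⟨hn, hv⟩
  | cons p rest ih =>
    simp only [List.foldl_cons, pvStepA]
    by_cases h : d.contains p = false
    · simp only [h, reduceIte]
      have hpk : p ∉ d.keys := by
        rw [PySem.Dict.contains_eq_decide_mem_keys] at h
        simpa using h
      have hkeys : (d.insert p (d.keys.length : Int)).keys = d.keys ++ [p] :=
        PySem.Dict.keys_insert_of_not_contains _ _ h
      have hn' : (d.insert p (d.keys.length : Int)).keys.Nodup := by
        rw [hkeys]
        simp [List.nodup_append, hn]
        intro a ha hEq
        exact hpk (hEq ▸ ha)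
      have hv' : ∀ q, (d.insert p (d.keys.length : Int)).get? q
          = (PySem.List.index? (d.insert p (d.keys.length : Int)).keys q).map (fun k => (k : Int)) := by
        intro q
        rw [hkeys]
        by_cases hq : q = p
        · subst hq
          rw [PySem.Dict.get?_insert_self, PySem.List.index?_append_singleton_self _ _ hpk]
          rfl
        · rw [PySem.Dict.get?_insert_of_ne _ _ hq, hv q]
          by_cases hm : q ∈ d.keys
          · rw [PySem.List.index?_append_of_mem _ hm]
          · rw [(PySem.List.index?_eq_none_iff _ _).mpr hm, (PySem.List.index?_eq_none_iff _ _).mpr (by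
              simp [hm, hq])]
      have hlen : ((d.keys.length : Int) + 1) = (((d.insert p (d.keys.length : Int)).keys.length : Int)) := by
        rw [hkeys]; simp
      rw [hlen]
      exact ih _ hn' hv'
    · simp only [Bool.not_eq_false] at h
      simp only [h, Bool.true_eq_false, reduceIte]
      exact ih d hn hv

-- the interleaved second loop is two independent folds over enumerate(paths)
theorem pvLoopA2_eq (M : PySem.Dict String Int) (l : List String) (i : Int)
    (bti : PySem.Dict Int (List Int)) (itb : PySem.Dict Int Int) :
    pvLoopA2 M l i bti itb =
      ((PySem.List.enumerate l i).foldl (fun d ip =>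
          if d.contains ((M.get? ip.2).getD 0) = false then d.insert ((M.get? ip.2).getD 0) [ip.1]
          else d.modify ((M.get? ip.2).getD 0) [] (fun xs => xs ++ [ip.1])) bti,
       (PySem.List.enumerate l i).foldl (fun d ip => d.insert ip.1 ((M.get? ip.2).getD 0)) itb) := by
  induction l generalizing i bti itb with
  | nil => simp [pvLoopA2, PySem.List.enumerate_nil]
  | cons p rest ih =>
    rw [PySem.List.enumerate_cons]
    simp only [pvLoopA2, List.foldl_cons]
    exact ih (i + 1) _ _

-- keys of A's bag_to_index loop
theorem pvKB (M : PySem.Dict String Int) (l : List (Int × String)) (d : PySem.Dict Int (List Int)) :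
    ((l.foldl (fun d ip =>
        if d.contains ((M.get? ip.2).getD 0) = false then d.insert ((M.get? ip.2).getD 0) [ip.1]
        else d.modify ((M.get? ip.2).getD 0) [] (fun xs => xs ++ [ip.1])) d).keys)
      = PySem.Set.update d.keys (l.map (fun ip => (M.get? ip.2).getD 0)) := by
  induction l generalizing d with
  | nil => simp [PySem.Set.update]
  | cons ip rest ih =>
    simp only [List.foldl_cons, List.map_cons, PySem.Set.update]
    by_cases h : d.contains ((M.get? ip.2).getD 0) = false
    · simp only [h, reduceIte]
      rw [ih]
      have hk : ((M.get? ip.2).getD 0) ∉ d.keys := by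
        rw [PySem.Dict.contains_eq_decide_mem_keys] at h
        simpa using h
      rw [PySem.Dict.keys_insert_of_not_contains _ _ h]
      simp only [PySem.Set.update, PySem.Set.add, PySem.Set.contains]
      simp [hk]
    · simp only [Bool.not_eq_false] at h
      simp only [h, Bool.true_eq_false, reduceIte]
      rw [ih]
      have hk : ((M.get? ip.2).getD 0) ∈ d.keys := by
        rw [PySem.Dict.contains_eq_decide_mem_keys] at h
        simpa using h
      rw [PySem.Dict.keys_modify, PySem.Dict.keys_insert_of_contains _ _ (by
        rw [PySem.Dict.contains_eq_decide_mem_keys]; simpa using hk)]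
      simp only [PySem.Set.update, PySem.Set.add, PySem.Set.contains]
      simp [hk]

-- value at each key of A's bag_to_index loop
theorem pvGB (M : PySem.Dict String Int) (l : List (Int × String)) (d : PySem.Dict Int (List Int)) (c : Int) :
    ((l.foldl (fun d ip =>
        if d.contains ((M.get? ip.2).getD 0) = false then d.insert ((M.get? ip.2).getD 0) [ip.1]
        else d.modify ((M.get? ip.2).getD 0) [] (fun xs => xs ++ [ip.1])) d).getD c [])
      = d.getD c [] ++ (l.filter (fun ip => (M.get? ip.2).getD 0 == c)).map (fun ip => ip.1) := by
  induction l generalizing d with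
  | nil => simp
  | cons ip rest ih =>
    simp only [List.foldl_cons]
    by_cases h : d.contains ((M.get? ip.2).getD 0) = false
    · simp only [h, reduceIte]
      rw [ih]
      by_cases hc : c = (M.get? ip.2).getD 0
      · subst hc
        rw [PySem.Dict.getD_insert, PySem.Dict.getD_of_not_contains _ _ h]
        simp
      · rw [PySem.Dict.getD_insert]
        simp only [hc, reduceIte]
        rw [List.filter_cons]
        have : ((M.get? ip.2).getD 0 == c) = false := by simpa using fun hEq => hc hEq.symm
        simp [this]
    · simp only [Bool.not_eq_false] at h
      simp only [h, Bool.true_eq_false, reduceIte]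
      rw [ih]
      by_cases hc : c = (M.get? ip.2).getD 0
      · subst hc
        rw [PySem.Dict.getD_modify]
        simp
      · rw [PySem.Dict.getD_modify]
        simp only [hc, reduceIte]
        rw [List.filter_cons]
        have : ((M.get? ip.2).getD 0 == c) = false := by simpa using fun hEq => hc hEq.symm
        simp [this]

theorem pvIndexGetElem {α : Type} [BEq α] [LawfulBEq α] (up : List α) (b : Nat) (hn : up.Nodup) (h : b < up.length) :
    PySem.List.index? up up[b] = some b := by
  simp only [PySem.List.index?_eq_idxOf?]
  rw [List.idxOf?_eq_some_iff]
  exact ⟨h, rfl, fun j hj hEq => absurd (List.Nodup.getElem_inj_iff hn |>.mp hEq) (by omega)⟩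

-- set-of-list commutes with an injective-on-the-input map
theorem pvSetUpdateMap (f : String → Int) (l s : List String)
    (hinj : ∀ x ∈ s ++ l, ∀ y ∈ s ++ l, f x = f y → x = y) :
    PySem.Set.update (s.map f) (l.map f) = (PySem.Set.update s l).map f := by
  induction l generalizing s with
  | nil => simp [PySem.Set.update]
  | cons x xs ih =>
    simp only [List.map_cons, PySem.Set.update, List.foldl_cons]
    have hmem : PySem.Set.contains (s.map f) (f x) = PySem.Set.contains s x := by
      simp only [PySem.Set.contains, List.contains_eq_mem, List.mem_map, decide_eq_decide]
      constructor
      · rintro ⟨a, ha, hfa⟩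
        have : a = x := hinj a (by simp [ha]) x (by simp) hfa
        exact this ▸ ha
      · intro hx; exact ⟨x, hx, rfl⟩
    by_cases hc : PySem.Set.contains s x = true
    · have h1 : PySem.Set.add (s.map f) (f x) = s.map f := by
        simp only [PySem.Set.add]; rw [hmem, hc]; simp
      have h2 : PySem.Set.add s x = s := by simp only [PySem.Set.add]; rw [hc]; simp
      rw [h1, h2]
      exact ih s (fun a ha b hb => hinj a (by
        rcases List.mem_append.mp ha with h | h
        · exact List.mem_append.mpr (Or.inl h)
        · simp [h]) b (by
        rcases List.mem_append.mp hb with h | h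
        · exact List.mem_append.mpr (Or.inl h)
        · simp [h]))
    · have hc' : PySem.Set.contains s x = false := by simpa using hc
      have h1 : PySem.Set.add (s.map f) (f x) = (s ++ [x]).map f := by
        simp only [PySem.Set.add]; rw [hmem, hc']; simp
      have h2 : PySem.Set.add s x = s ++ [x] := by simp only [PySem.Set.add]; rw [hc']; simp
      rw [h1, h2]
      exact ih (s ++ [x]) (fun a ha b hb => hinj a (by
        rcases List.mem_append.mp ha with h | h
        · rcases List.mem_append.mp h with h | h
          · exact List.mem_append.mpr (Or.inl h)
          · simp at h; simp [h]
        · simp [h]) b (by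
        rcases List.mem_append.mp hb with h | h
        · rcases List.mem_append.mp h with h | h
          · exact List.mem_append.mpr (Or.inl h)
          · simp at h; simp [h]
        · simp [h]))

-- B's rank of a path: its position in the dedup list
def pvRank (up : List String) (p : String) : Int := (((PySem.List.index? up p).getD 0 : Nat) : Int)

theorem parse_paths_main (paths : List String) : parse_paths paths = parse_paths_alt paths := by
  have hdefup : PySem.Set.update ([] : List String) paths = PySem.List.dedup paths := by
    simp [PySem.Set.update, PySem.Set.ofList, PySem.Set.empty]
  set up := PySem.List.dedup paths with hup
  have hnup : up.Nodup := PySem.List.nodup_dedup paths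
  set M := (paths.foldl pvStepA (PySem.Dict.empty, 0)).1 with hM
  have hkeysM : M.keys = up := by
    rw [hM, pvA1_keys]
    simpa using hdefup
  have hinv := pvA1_invariant paths PySem.Dict.empty (by simp)
    (by intro q; simp [PySem.List.index?_eq_idxOf?, List.idxOf?_nil])
  have hstart : ((PySem.Dict.empty : PySem.Dict String Int).keys.length : Int) = 0 := by simp
  rw [hstart] at hinv
  have hbag : ∀ p ∈ paths, (M.get? p).getD 0 = pvRank up p := by
    intro p hp
    have hpu : p ∈ up := (PySem.List.mem_dedup paths p).mpr hp
    obtain ⟨j, hj⟩ := Option.isSome_iff_exists.mp ((PySem.List.index?_isSome_iff up p).mpr hpu)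
    rw [← hM] at hinv
    rw [hinv.2 p, hkeysM, hj, pvRank, hj]
    rfl
  have hRankElem : ∀ (b : Nat) (h : b < up.length), pvRank up up[b] = (b : Int) := by
    intro b h
    rw [pvRank, pvIndexGetElem up b hnup h]
    rfl
  have hRankEq : ∀ q ∈ up, ∀ (b : Nat) (h : b < up.length), pvRank up q = (b : Int) → q = up[b] := by
    intro q hq b h hrk
    obtain ⟨j, hj⟩ := Option.isSome_iff_exists.mp ((PySem.List.index?_isSome_iff up q).mpr hq)
    obtain ⟨hjl, hju, -⟩ := PySem.List.getElem_of_index?_eq_some hj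
    have : (j : Int) = (b : Int) := by rw [pvRank, hj] at hrk; simpa using hrk
    have hjb : j = b := by exact_mod_cast this
    subst hjb; exact hju.symm
  have hinjU : ∀ x ∈ up, ∀ y ∈ up, pvRank up x = pvRank up y → x = y := by
    intro x hxu y hyu hxy
    obtain ⟨j, hj⟩ := Option.isSome_iff_exists.mp ((PySem.List.index?_isSome_iff up y).mpr hyu)
    obtain ⟨hjl, hju, -⟩ := PySem.List.getElem_of_index?_eq_some hj
    have hr : pvRank up y = (j : Int) := by rw [pvRank, hj]; rfl
    have := hRankEq x hxu j hjl (by rw [hxy, hr])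
    rw [this, hju]
  have hsndmem : ∀ ip ∈ PySem.List.enumerate paths 0, ip.2 ∈ paths := by
    intro ip hip
    obtain ⟨k, hk, hipe⟩ := (PySem.List.mem_enumerate_iff _ _ _).mp hip
    rw [hipe]
    exact List.getElem_mem hk
  have hEnumFstNodup : ∀ {α : Type} (xs : List α) (s : Int),
      ((PySem.List.enumerate xs s).map (fun p => p.1)).Nodup := by
    intro α xs s
    exact List.Pairwise.imp (fun h => ne_of_lt h)
      ((List.pairwise_map).mpr (PySem.List.pairwise_lt_enumerate xs s))
  -- the second loop, split into its two folds
  rw [parse_paths, parse_paths_alt, pvLoopA2_eq]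
  refine Prod.ext ?_ (Prod.ext ?_ ?_)
  · simpa using hkeysM
  · -- bag_to_index
    show (List.foldl _ PySem.Dict.empty (PySem.List.enumerate paths 0)).items = _
    -- B side: a fold inserting fresh distinct keys
    rw [PySem.Dict.items_foldl_insert_fresh (PySem.List.enumerate up 0)
      (fun bp => bp.1) _ PySem.Dict.empty
      (fun a _ => PySem.Dict.contains_empty _) (hEnumFstNodup up 0)]
    -- A side: keys of the fold
    have hkeysA : ((PySem.List.enumerate paths 0).foldl (fun d ip =>
        if d.contains ((M.get? ip.2).getD 0) = false then d.insert ((M.get? ip.2).getD 0) [ip.1]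
        else d.modify ((M.get? ip.2).getD 0) [] (fun xs => xs ++ [ip.1])) PySem.Dict.empty).keys
        = up.map (pvRank up) := by
      rw [pvKB]
      have h1 : (PySem.List.enumerate paths 0).map (fun ip => (M.get? ip.2).getD 0)
          = paths.map (pvRank up) := by
        rw [show (fun (ip : Int × String) => (M.get? ip.2).getD 0)
              = ((fun q => (M.get? q).getD 0) ∘ (fun ip => ip.2)) from rfl,
          ← List.map_map, PySem.List.map_snd_enumerate]
        exact List.map_congr_left hbag
      rw [h1]
      have hinjr : ∀ x ∈ ([] : List String) ++ paths, ∀ y ∈ ([] : List String) ++ paths,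
          pvRank up x = pvRank up y → x = y := by
        intro x hx y hy hxy
        simp only [List.nil_append] at hx hy
        exact hinjU x ((PySem.List.mem_dedup paths x).mpr hx)
          y ((PySem.List.mem_dedup paths y).mpr hy) hxy
      have := pvSetUpdateMap (pvRank up) paths []
        (by simpa using hinjr)
      simp only [List.map_nil] at this
      have hempty : (PySem.Dict.empty : PySem.Dict Int (List Int)).keys = [] := by simp
      rw [hempty]
      rw [this, hdefup]
    have hnodA : ((PySem.List.enumerate paths 0).foldl (fun d ip =>
        if d.contains ((M.get? ip.2).getD 0) = false then d.insert ((M.get? ip.2).getD 0) [ip.1]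
        else d.modify ((M.get? ip.2).getD 0) [] (fun xs => xs ++ [ip.1])) PySem.Dict.empty).keys.Nodup := by
      rw [hkeysA]
      exact List.Nodup.map_on hinjU hnup
    rw [PySem.Dict.items_eq_map_keys _ hnodA ([] : List Int), hkeysA,
      show (PySem.Dict.empty : PySem.Dict Int (List Int)).items = [] from rfl]
    simp only [PySem.List.foldl_append_if, List.nil_append, List.map_map]
    apply List.ext_getElem (by simp [PySem.List.length_enumerate])
    intro b hb1 hb2
    have hbu : b < up.length := by simpa using hb1
    simp only [List.getElem_map, Function.comp]
    rw [PySem.List.getElem_enumerate, hRankElem b hbu, pvGB]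
    have hfilter : (PySem.List.enumerate paths 0).filter (fun ip => (M.get? ip.2).getD 0 == (b : Int))
        = (PySem.List.enumerate paths 0).filter (fun iq => iq.2 == up[b]) := by
      apply List.filter_congr
      intro iq hiq
      have hqp : iq.2 ∈ paths := hsndmem iq hiq
      have hqu : iq.2 ∈ up := (PySem.List.mem_dedup paths iq.2).mpr hqp
      rw [hbag iq.2 hqp]
      by_cases hq : iq.2 = up[b]
      · rw [hq, hRankElem b hbu]
        simp
      · have hne : pvRank up iq.2 ≠ (b : Int) := fun hc => hq (hRankEq iq.2 hqu b hbu hc)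
        simp [hq, hne]
    rw [hfilter]
    simp [PySem.Dict.getD_empty]
  · -- index_to_bag
    show (List.foldl _ PySem.Dict.empty (PySem.List.enumerate paths 0)).items = _
    rw [PySem.Dict.items_foldl_insert_fresh (PySem.List.enumerate paths 0)
      (fun ip => ip.1) (fun ip => (M.get? ip.2).getD 0) PySem.Dict.empty
      (fun a _ => PySem.Dict.contains_empty _) (hEnumFstNodup paths 0),
      PySem.Dict.items_foldl_insert_fresh (PySem.List.enumerate paths 0)
      (fun ip => ip.1) _ PySem.Dict.empty
      (fun a _ => PySem.Dict.contains_empty _) (hEnumFstNodup paths 0)]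
    congr 1
    exact List.map_congr_left (fun ip hip => by
      rw [hbag ip.2 (hsndmem ip hip)]
      simp [pvRank, hup])

-- ===== VERDICT (by name: the statement is the Claim_ definition above) =====
theorem parse_paths_spec : Claim_equal_parse_paths := by
  intro paths _
  exact parse_paths_main paths
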